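-- pv_equiv track=rewrite | github.com/shiryusann/KanbunKundoku | automaton.py | chunk_characters
-- ===== SOURCE A (Python) =====
-- from typing import List, Dict, Tuple
--
-- def chunk_characters(characters:List[Dict[str, str]]):
--     # if there is hypen in position marks, connect them together
--     chunks_with_order = []
--     chunk = []
--     for c in range(len(characters)):
--         chunk.append((characters[c], c))
--         if "-" not in characters[c]["position"]:
--             chunks_with_order.append((chunk, chunk[0][0]["position"] if "-" not in chunk[0][0]["position"] else chunk[0][0]["position"][0]))
--             chunk = []
--     return chunks_with_order
-- ===== SOURCE B (Python) =====
-- def chunk_characters(characters):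
--     # split-at-boundary decomposition: repeatedly scan the hyphenated prefix,
--     # cut off the chunk up to and including the first non-hyphenated mark,
--     # and emit it; a trailing hyphenated tail is never emitted.
--     out = []
--     i = 0
--     rest = characters
--     while True:
--         k = 0
--         while k < len(rest) and "-" in rest[k]["position"]:
--             k += 1
--         if k == len(rest):
--             return out
--         head, rest = rest[:k + 1], rest[k + 1:]
--         chunk = [(ch, j) for j, ch in enumerate(head, i)]
--         pos = head[0]["position"]
--         out.append((chunk, pos if "-" not in pos else pos[0]))
--         i += k + 1
-- ===== Notes on version B (the rewrite author's own statement) =====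
-- stated objective: alternative
-- what changed: A makes one element-wise pass growing a pending chunk inside a (result, chunk) accumulator; B repeatedly scans for the next non-hyphenated boundary, slices the chunk off the front (head/tail split) and rebuilds it by enumerate, so no pending-chunk accumulator exists and the trailing hyphenated tail is dropped structurally.
import Mathlib
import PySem

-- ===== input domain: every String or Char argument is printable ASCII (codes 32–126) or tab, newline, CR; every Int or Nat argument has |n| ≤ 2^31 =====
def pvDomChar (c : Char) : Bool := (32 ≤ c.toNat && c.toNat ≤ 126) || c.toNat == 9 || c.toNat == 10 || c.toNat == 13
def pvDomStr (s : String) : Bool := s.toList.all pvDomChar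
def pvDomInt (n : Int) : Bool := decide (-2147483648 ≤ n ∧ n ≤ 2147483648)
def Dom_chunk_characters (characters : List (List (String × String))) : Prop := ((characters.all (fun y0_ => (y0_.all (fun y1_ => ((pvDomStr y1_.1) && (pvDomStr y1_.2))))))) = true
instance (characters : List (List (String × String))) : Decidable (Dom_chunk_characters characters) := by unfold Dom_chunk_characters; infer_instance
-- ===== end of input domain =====

-- B differs from A by decomposition: instead of one element-wise pass carrying a pending chunk in the
-- accumulator, B repeatedly finds the next non-hyphenated boundary, slices that chunk off the front and
-- emits it. Equivalence of the RETURN value is proved on Pre_ (every dict has a "position" key).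

-- shared helpers (the Python expressions c["position"] and '"-" in p')
def pvPosD (d : List (String × String)) : String :=
  PySem.Dict.getD (PySem.Dict.mk d) "position" ""

def pvHyp (d : List (String × String)) : Bool :=
  PySem.Str.isIn "-" (pvPosD d)

-- chunk[0][0]["position"] if "-" not in chunk[0][0]["position"] else chunk[0][0]["position"][0]
def pvTagA (chunk : List ((List (String × String)) × Int)) : String :=
  let p := pvPosD (PySem.List.pyGetD chunk 0 ([], 0)).1
  if PySem.Str.isIn "-" p = false then p
  else ((PySem.Str.pyGet? p 0).map (fun c => String.mk [c])).getD ""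

-- ===== PORT A =====
-- for c in range(len(characters)): chunk.append((characters[c], c)); if "-" not in …: flush
def chunk_characters (characters : List (List (String × String))) : List ((List ((List (String × String)) × Int)) × String) :=
  ((PySem.List.pyRange 0 (characters.length : Int) 1).foldl
    (fun (st : (List ((List ((List (String × String)) × Int)) × String)) × (List ((List (String × String)) × Int))) c =>
      let ch := PySem.List.pyGetD characters c []
      let chunk := st.2 ++ [(ch, c)]
      if pvHyp ch = false then
        (st.1 ++ [(chunk, pvTagA chunk)], [])
      else (st.1, chunk))
    ([], [])).1

-- ===== PORT B =====
-- the inner 'while k < len(rest) and "-" in rest[k]["position"]' scan is List.takeWhile's length;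
-- head, rest = rest[:k+1], rest[k+1:]; chunk = [(ch, j) for j, ch in enumerate(head, i)]
def chunk_characters_go (rest : List (List (String × String))) (i : Int) : List ((List ((List (String × String)) × Int)) × String) :=
  let k := (rest.takeWhile pvHyp).length
  if hk : k = rest.length then []
  else
    let head := PySem.List.slice rest none (some ((k : Int) + 1))
    let tl := PySem.List.slice rest (some ((k : Int) + 1)) none
    let chunk := (PySem.List.enumerate head i).map (fun p => (p.2, p.1))
    let pos := pvPosD (head.headD [])
    (chunk, if PySem.Str.isIn "-" pos = false then pos
            else ((PySem.Str.pyGet? pos 0).map (fun c => String.mk [c])).getD "")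
      :: chunk_characters_go tl (i + (k : Int) + 1)
termination_by rest.length
decreasing_by
  have h1 : (rest.takeWhile pvHyp).length ≤ rest.length := by simpa using List.IsPrefix.length_le (List.takeWhile_prefix pvHyp)
  simp only [PySem.List.slice_some_none]
  have h2 : PySem.List.clampIdx rest.length ((k : Int) + 1) = min (k + 1) rest.length := by
    have : ((k : Int) + 1) = ((k + 1 : Nat) : Int) := by push_cast; ring
    rw [this, PySem.List.clampIdx_natCast]
  rw [h2]
  simp only [List.length_drop]
  omega

def chunk_characters_alt (characters : List (List (String × String))) : List ((List ((List (String × String)) × Int)) × String) :=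
  chunk_characters_go characters 0

-- ===== PRECONDITION & SPEC =====
-- Pre_ excludes exactly the inputs where Python A raises KeyError: a dict without a "position" key.
def Pre_chunk_characters (characters : List (List (String × String))) : Prop :=
  (characters.all (fun d => PySem.Dict.contains (PySem.Dict.mk d) "position")) = true
instance (characters : List (List (String × String))) : Decidable (Pre_chunk_characters characters) := by unfold Pre_chunk_characters; infer_instance

def pvWitness_chunk_characters : (List (List (String × String))) := [[("position", "1-2")], [("position", "1")]]

def Spec_chunk_characters (characters : List (List (String × String))) (out : List ((List ((List (String × String)) × Int)) × String)) : Prop := out = chunk_characters_alt characters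
instance (characters : List (List (String × String))) (out : List ((List ((List (String × String)) × Int)) × String)) : Decidable (Spec_chunk_characters characters out) := by unfold Spec_chunk_characters; infer_instance

-- ===== CLAIM (what is proved, stated in full; the proofs are below) =====
def Claim_equal_chunk_characters : Prop := ∀ (characters : List (List (String × String))), Dom_chunk_characters characters → Pre_chunk_characters characters → Spec_chunk_characters characters (chunk_characters characters)

-- ===== LEMMAS AND PROOFS =====

-- A's loop written as structural recursion over the list with (pending, out) state
def specA (xs : List (List (String × String))) (i : Int)
    (pending : List ((List (String × String)) × Int))
    (out : List ((List ((List (String × String)) × Int)) × String)) :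
    List ((List ((List (String × String)) × Int)) × String) :=
  match xs with
  | [] => out
  | d :: r =>
    let chunk := pending ++ [(d, i)]
    if pvHyp d = false then specA r (i + 1) [] (out ++ [(chunk, pvTagA chunk)])
    else specA r (i + 1) chunk out

-- the same recursion with the emitted list built by cons instead of an accumulator
def goBAux (xs : List (List (String × String))) (i : Int)
    (pending : List ((List (String × String)) × Int)) :
    List ((List ((List (String × String)) × Int)) × String) :=
  match xs with
  | [] => []
  | d :: r =>
    if pvHyp d = false then (pending ++ [(d, i)], pvTagA (pending ++ [(d, i)])) :: goBAux r (i + 1) []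
    else goBAux r (i + 1) (pending ++ [(d, i)])

-- index-fold over pyRange with pyGetD = fold over enumerate of the dropped suffix
lemma foldl_pyRange_enum {α σ : Type} (g : σ → Int → α → σ) (d : α) :
    ∀ (n : Nat) (a : Nat) (xs : List α) (init : σ), xs.length - a = n →
    (PySem.List.pyRange (a : Int) (xs.length : Int) 1).foldl
        (fun acc c => g acc c (PySem.List.pyGetD xs c d)) init
      = (PySem.List.enumerate (xs.drop a) (a : Int)).foldl (fun acc p => g acc p.1 p.2) init := by
  intro n
  induction n with
  | zero =>
    intro a xs init h
    have hge : (xs.length : Int) ≤ (a : Int) := by exact_mod_cast Nat.le_of_sub_eq_zero h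
    rw [PySem.List.pyRange_one_eq_nil hge, List.drop_eq_nil_of_le (by omega)]
    simp [PySem.List.enumerate]
  | succ m ih =>
    intro a xs init h
    have hlt : a < xs.length := by omega
    rw [PySem.List.pyRange_one_cons (by exact_mod_cast hlt)]
    rw [List.drop_eq_getElem_cons hlt, PySem.List.enumerate_cons]
    simp only [List.foldl_cons]
    have hget : PySem.List.pyGetD xs (a : Int) d = xs[a] := by
      rw [PySem.List.pyGetD_natCast]
      exact List.getD_eq_getElem xs d hlt
    rw [hget]
    have := ih (a + 1) xs (g init (a : Int) xs[a]) (by omega)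
    rw [show ((a : Int) + 1) = ((a + 1 : Nat) : Int) by push_cast; ring]
    exact this

-- the enumerate-fold of A's body is specA
lemma foldl_enum_specA :
    ∀ (xs : List (List (String × String))) (i : Int)
      (out : List ((List ((List (String × String)) × Int)) × String))
      (pending : List ((List (String × String)) × Int)),
    ((PySem.List.enumerate xs i).foldl
      (fun (st : (List ((List ((List (String × String)) × Int)) × String)) × (List ((List (String × String)) × Int))) p =>
        let chunk := st.2 ++ [(p.2, p.1)]
        if pvHyp p.2 = false then (st.1 ++ [(chunk, pvTagA chunk)], [])
        else (st.1, chunk))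
      (out, pending)).1 = specA xs i pending out := by
  intro xs
  induction xs with
  | nil => intro i out pending; simp [PySem.List.enumerate, specA]
  | cons d r ih =>
    intro i out pending
    rw [PySem.List.enumerate_cons, List.foldl_cons]
    by_cases h : pvHyp d = false <;> simp only [specA, h, if_pos, if_neg, Bool.not_eq_false] <;>
      first
        | exact ih (i + 1) (out ++ [(pending ++ [(d, i)], pvTagA (pending ++ [(d, i)]))]) []
        | exact ih (i + 1) out (pending ++ [(d, i)])

lemma specA_eq_goBAux :
    ∀ (xs : List (List (String × String))) (i : Int)
      (pending : List ((List (String × String)) × Int))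
      (out : List ((List ((List (String × String)) × Int)) × String)),
    specA xs i pending out = out ++ goBAux xs i pending := by
  intro xs
  induction xs with
  | nil => intro i pending out; simp [specA, goBAux]
  | cons d r ih =>
    intro i pending out
    by_cases h : pvHyp d = false
    · simp only [specA, goBAux, h, ite_true]
      rw [ih, List.append_assoc]
      rfl
    · simp only [specA, goBAux, h, ite_false]
      exact ih _ _ _

-- span-shaped unfolding of goBAux
lemma goBAux_span :
    ∀ (xs : List (List (String × String))) (i : Int)
      (pending : List ((List (String × String)) × Int)),
    goBAux xs i pending =
      (match xs.dropWhile pvHyp with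
       | [] => []
       | b :: tl =>
         (pending ++ (PySem.List.enumerate (xs.takeWhile pvHyp ++ [b]) i).map (fun p => (p.2, p.1)),
          pvTagA (pending ++ (PySem.List.enumerate (xs.takeWhile pvHyp ++ [b]) i).map (fun p => (p.2, p.1))))
           :: goBAux tl (i + ((xs.takeWhile pvHyp).length : Int) + 1) []) := by
  intro xs
  induction xs with
  | nil => intro i pending; simp [goBAux, List.dropWhile]
  | cons d r ih =>
    intro i pending
    by_cases h : pvHyp d = false
    · simp only [goBAux, h, ite_true, List.dropWhile_cons, List.takeWhile_cons, Bool.not_eq_true] at *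
      simp [h, PySem.List.enumerate_cons, PySem.List.enumerate, goBAux]
    · have h' : pvHyp d = true := by revert h; cases pvHyp d <;> simp
      simp only [goBAux, h, ite_false, List.dropWhile_cons, List.takeWhile_cons, h', ite_true]
      rw [ih (i + 1) (pending ++ [(d, i)])]
      cases hd : r.dropWhile pvHyp with
      | nil => rfl
      | cons b tl =>
        simp only [reduceIte]
        have hch : pending ++ [(d, i)] ++ (PySem.List.enumerate (r.takeWhile pvHyp ++ [b]) (i + 1)).map (fun p => (p.2, p.1))
            = pending ++ (PySem.List.enumerate ((d :: r.takeWhile pvHyp) ++ [b]) i).map (fun p => (p.2, p.1)) := by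
          simp [PySem.List.enumerate_cons]
        have hidx : i + 1 + ((r.takeWhile pvHyp).length : Int) + 1
            = i + (((d :: r.takeWhile pvHyp).length : Nat) : Int) + 1 := by
          simp only [List.length_cons]; push_cast; ring
        rw [hch, hidx]
        simp

-- goBAux with empty pending is B's recursion
lemma goBAux_eq_go : ∀ (n : Nat) (xs : List (List (String × String))), xs.length ≤ n →
    ∀ (i : Int), goBAux xs i [] = chunk_characters_go xs i := by
  intro n
  induction n with
  | zero =>
    intro xs h i
    have : xs = [] := List.eq_nil_of_length_eq_zero (by omega)
    subst this
    simp [goBAux, chunk_characters_go]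
  | succ m ih =>
    intro xs h i
    rw [goBAux_span]
    rw [chunk_characters_go]
    set tw := xs.takeWhile pvHyp with htw
    have hx : tw ++ xs.dropWhile pvHyp = xs := List.takeWhile_append_dropWhile
    have hlen : tw.length + (xs.dropWhile pvHyp).length = xs.length := by
      conv_rhs => rw [← hx]
      rw [List.length_append]
    cases hd : xs.dropWhile pvHyp with
    | nil =>
      have : tw.length = xs.length := by rw [hd] at hlen; simpa using hlen
      simp [this]
    | cons b tl =>
      have hx2 : xs = tw ++ (b :: tl) := by rw [← hx, hd]
      have hk : tw.length ≠ xs.length := by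
        rw [hd] at hlen; simp at hlen; omega
      rw [dif_neg hk]
      have hcast : ((tw.length : Int) + 1) = ((tw.length + 1 : Nat) : Int) := by
        push_cast; ring
      have hhead : PySem.List.slice xs none (some ((tw.length : Int) + 1)) = tw ++ [b] := by
        rw [hcast, PySem.List.slice_to_natCast]
        conv_lhs => rw [hx2]
        rw [List.take_append, List.take_of_length_le (by omega)]
        simp
      have htl : PySem.List.slice xs (some ((tw.length : Int) + 1)) none = tl := by
        rw [hcast, PySem.List.slice_from_natCast]
        conv_lhs => rw [hx2]
        rw [List.drop_append, List.drop_of_length_le (by omega)]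
        simp
      rw [hhead, htl]
      have htag : pvTagA ((PySem.List.enumerate (tw ++ [b]) i).map (fun p => (p.2, p.1))) =
          (if PySem.Str.isIn "-" (pvPosD ((tw ++ [b]).headD [])) = false
           then pvPosD ((tw ++ [b]).headD [])
           else ((PySem.Str.pyGet? (pvPosD ((tw ++ [b]).headD [])) 0).map
                  (fun c => String.mk [c])).getD "") := by
        cases hc : tw ++ [b] with
        | nil => simp at hc
        | cons x rest0 =>
          simp [pvTagA, PySem.List.enumerate_cons, PySem.List.pyGetD_zero_cons]
      have htllen : tl.length < xs.length := by
        rw [hd] at hlen; simp only [List.length_cons] at hlen; omega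
      have htail : goBAux tl (i + (tw.length : Int) + 1) [] =
          chunk_characters_go tl (i + (tw.length : Int) + 1) := by
        apply ih
        omega
      simp only [List.nil_append] at *
      rw [htag, htail]

-- ===== VERDICT (by name: the statement is the Claim_ definition above) =====
theorem chunk_characters_spec : Claim_equal_chunk_characters := by
  intro characters _ _
  unfold Spec_chunk_characters
  have h1 : chunk_characters characters = specA characters 0 [] [] := by
    have h0 := foldl_pyRange_enum
      (g := fun (st : (List ((List ((List (String × String)) × Int)) × String)) × (List ((List (String × String)) × Int)))
            (c : Int) (ch : List (String × String)) =>
        let chunk := st.2 ++ [(ch, c)]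
        if pvHyp ch = false then (st.1 ++ [(chunk, pvTagA chunk)], ([] : List ((List (String × String)) × Int)))
        else (st.1, chunk))
      ([] : List (String × String)) characters.length 0 characters (([], [])) (by omega)
    have h2 := foldl_enum_specA characters 0 [] []
    calc chunk_characters characters
        = ((PySem.List.enumerate (characters.drop 0) ((0 : Nat) : Int)).foldl
            (fun (st : (List ((List ((List (String × String)) × Int)) × String)) × (List ((List (String × String)) × Int))) p =>
              let chunk := st.2 ++ [(p.2, p.1)]
              if pvHyp p.2 = false then (st.1 ++ [(chunk, pvTagA chunk)], [])
              else (st.1, chunk))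
            ([], [])).1 := congrArg Prod.fst h0
      _ = specA characters 0 [] [] := h2
  rw [h1, specA_eq_goBAux, List.nil_append, goBAux_eq_go characters.length characters (le_refl _) 0]
  rfl
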